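-- pv_equiv track=rewrite | github.com/wyattowalsh/wyattowalsh | scripts/art/physarum.py | _repo_recency_bands
-- ===== SOURCE A (Python) =====
-- from typing import Any
--
-- def _coerce_nonnegative_int(value: Any) -> int:
--     """Best-effort int coercion for snapshot counters and bands."""
--     try:
--         return max(0, int(value or 0))
--     except (TypeError, ValueError):
--         return 0
--
-- def _repo_recency_bands(repos: object) -> dict[str, int]:
--     """Return stable recency bands, falling back to repo ages when absent."""
--     bands = {"fresh": 0, "recent": 0, "established": 0, "legacy": 0}
--     if not isinstance(repos, list):
--         return bands
--
--     for repo in repos: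
--         if not isinstance(repo, dict):
--             continue
--         age_months = _coerce_nonnegative_int(repo.get("age_months", 0))
--         if age_months <= 3:
--             bands["fresh"] += 1
--         elif age_months <= 12:
--             bands["recent"] += 1
--         elif age_months <= 36:
--             bands["established"] += 1
--         else:
--             bands["legacy"] += 1
--     return bands
-- ===== SOURCE B (Python) =====
-- from typing import Any
--
-- def _coerce_nonnegative_int(value: Any) -> int:
--     """Best-effort int coercion for snapshot counters and bands."""
--     try:
--         return max(0, int(value or 0))
--     except (TypeError, ValueError):
--         return 0
--
-- _LABELS = ["fresh", "recent", "established", "legacy"]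
-- _BOUNDS = [3, 12, 36]
--
-- def _band_index(age: int) -> int:
--     """bisect_left over the sorted threshold table."""
--     lo, hi = 0, len(_BOUNDS)
--     while lo < hi:
--         mid = (lo + hi) // 2
--         if _BOUNDS[mid] < age:
--             lo = mid + 1
--         else:
--             hi = mid
--     return lo
--
-- def _repo_recency_bands(repos: object) -> dict[str, int]:
--     """Return stable recency bands, falling back to repo ages when absent."""
--     counts = [0, 0, 0, 0]
--     if isinstance(repos, list):
--         for repo in repos:
--             if isinstance(repo, dict):
--                 age_months = _coerce_nonnegative_int(repo.get("age_months", 0))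
--                 counts[_band_index(age_months)] += 1
--     return dict(zip(_LABELS, counts))
-- ===== Notes on version B (the rewrite author's own statement) =====
-- stated objective: idiomatic
-- what changed: Replaces the dict-of-bands with if/elif cascade by a fixed counts array indexed via a bisect_left binary search over a sorted threshold table, zipping labels with counts at the end.
import Mathlib
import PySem

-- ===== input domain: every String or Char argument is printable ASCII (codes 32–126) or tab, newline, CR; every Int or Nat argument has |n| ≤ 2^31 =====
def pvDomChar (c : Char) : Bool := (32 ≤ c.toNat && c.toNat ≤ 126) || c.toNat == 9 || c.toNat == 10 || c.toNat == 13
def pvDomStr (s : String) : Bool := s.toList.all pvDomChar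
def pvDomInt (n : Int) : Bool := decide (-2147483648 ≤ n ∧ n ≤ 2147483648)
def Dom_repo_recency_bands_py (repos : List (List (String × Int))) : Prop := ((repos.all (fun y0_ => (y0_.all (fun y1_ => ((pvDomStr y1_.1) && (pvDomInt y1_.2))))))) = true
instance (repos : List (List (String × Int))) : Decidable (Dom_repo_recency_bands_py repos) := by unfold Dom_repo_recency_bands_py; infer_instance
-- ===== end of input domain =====

-- B counts into a fixed array indexed by a binary search over a threshold table instead of
-- A's dict with an if/elif cascade (objective: idiomatic); return values proved equal.

-- ===== PORT A =====
-- _coerce_nonnegative_int: `value` is an int here, so `int(value or 0)` is `value` if nonzero else 0,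
-- and the except branch is unreachable.
def pvCoerce (value : Int) : Int := max 0 (if value == 0 then 0 else value)

def repo_recency_bands_py (repos : List (List (String × Int))) : List (String × Int) :=
  let bands : PySem.Dict String Int :=
    PySem.Dict.ofList [("fresh", 0), ("recent", 0), ("established", 0), ("legacy", 0)]
  -- `repos` is typed as a list of dicts, so both isinstance guards always pass
  (repos.foldl (fun bands repo =>
      let age_months := pvCoerce ((PySem.Dict.mk repo).getD "age_months" 0)
      if age_months ≤ 3 then bands.modify "fresh" 0 (· + 1)
      else if age_months ≤ 12 then bands.modify "recent" 0 (· + 1)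
      else if age_months ≤ 36 then bands.modify "established" 0 (· + 1)
      else bands.modify "legacy" 0 (· + 1)) bands).items

-- ===== PORT B =====
def pvLabels : List String := ["fresh", "recent", "established", "legacy"]
def pvBounds : List Int := [3, 12, 36]

-- the while-loop of _band_index; terminates since hi - lo shrinks
def pvBandLoop (lo hi : Nat) (age : Int) : Nat :=
  if _h : lo < hi then
    let mid := (lo + hi) / 2
    -- _BOUNDS[mid]: mid is always in range during the search, so getD is exact here
    if pvBounds.getD mid 0 < age then pvBandLoop (mid + 1) hi age
    else pvBandLoop lo mid age
  else lo
termination_by hi - lo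
decreasing_by all_goals omega

def pvBandIndex (age : Int) : Nat := pvBandLoop 0 pvBounds.length age

def repo_recency_bands_py_alt (repos : List (List (String × Int))) : List (String × Int) :=
  let counts : List Int :=
    repos.foldl (fun counts repo =>
      let age_months := pvCoerce ((PySem.Dict.mk repo).getD "age_months" 0)
      -- counts[i] += 1; the band index is always 0..3, in range
      let i := pvBandIndex age_months
      counts.set i (counts.getD i 0 + 1)) [0, 0, 0, 0]
  (PySem.Dict.ofList (pvLabels.zip counts)).items

-- ===== PRECONDITION & SPEC =====
def Spec_repo_recency_bands_py (repos : List (List (String × Int))) (out : List (String × Int)) : Prop := out = repo_recency_bands_py_alt repos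
instance (repos : List (List (String × Int))) (out : List (String × Int)) : Decidable (Spec_repo_recency_bands_py repos out) := by unfold Spec_repo_recency_bands_py; infer_instance

-- ===== CLAIM (what is proved, stated in full; the proofs are below) =====
def Claim_equal_repo_recency_bands_py : Prop := ∀ (repos : List (List (String × Int))), Dom_repo_recency_bands_py repos → Spec_repo_recency_bands_py repos (repo_recency_bands_py repos)

-- ===== LEMMAS AND PROOFS =====

theorem pvBandIndex_eq (age : Int) :
    pvBandIndex age =
      if age ≤ 3 then 0 else if age ≤ 12 then 1 else if age ≤ 36 then 2 else 3 := by
  by_cases h1 : age ≤ 3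
  · have a3 : ¬((3 : Int) < age) := by omega
    have a12 : ¬((12 : Int) < age) := by omega
    simp [pvBandIndex, pvBandLoop, pvBounds, List.getD, a3, a12, h1]
  · by_cases h2 : age ≤ 12
    · have a3 : (3 : Int) < age := by omega
      have a12 : ¬((12 : Int) < age) := by omega
      simp [pvBandIndex, pvBandLoop, pvBounds, List.getD, a3, a12, h1, h2]
    · by_cases h3 : age ≤ 36
      · have a12 : (12 : Int) < age := by omega
        have a36 : ¬((36 : Int) < age) := by omega
        simp [pvBandIndex, pvBandLoop, pvBounds, List.getD, a12, a36, h1, h2, h3]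
      · have a12 : (12 : Int) < age := by omega
        have a36 : (36 : Int) < age := by omega
        simp [pvBandIndex, pvBandLoop, pvBounds, List.getD, a12, a36, h1, h2, h3]

-- loop invariant: A's fold from the quad dict has the same items as labels zipped with B's fold
theorem pv_fold_eq (repos : List (List (String × Int))) (a b c d : Int) :
    (repos.foldl (fun bands repo =>
        let age_months := pvCoerce ((PySem.Dict.mk repo).getD "age_months" 0)
        if age_months ≤ 3 then bands.modify "fresh" 0 (· + 1)
        else if age_months ≤ 12 then bands.modify "recent" 0 (· + 1)
        else if age_months ≤ 36 then bands.modify "established" 0 (· + 1)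
        else bands.modify "legacy" 0 (· + 1))
      (PySem.Dict.mk [("fresh", a), ("recent", b), ("established", c), ("legacy", d)])).items
    = (PySem.Dict.ofList (pvLabels.zip
      (repos.foldl (fun counts repo =>
          let age_months := pvCoerce ((PySem.Dict.mk repo).getD "age_months" 0)
          let i := pvBandIndex age_months
          counts.set i (counts.getD i 0 + 1)) [a, b, c, d]))).items := by
  induction repos generalizing a b c d with
  | nil => simp [pvLabels, List.zip, PySem.Dict.ofList, PySem.Dict.update, PySem.Dict.insert,
      PySem.Dict.contains, PySem.Dict.empty]
  | cons repo rest ih =>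
    simp only [List.foldl_cons]
    rw [pvBandIndex_eq]
    set age := pvCoerce ((PySem.Dict.mk repo).getD "age_months" 0) with hage
    by_cases h1 : age ≤ 3
    · simpa [h1, PySem.Dict.modify, PySem.Dict.getD, PySem.Dict.get?, PySem.Dict.insert,
        PySem.Dict.contains, List.set, List.getD] using ih (a + 1) b c d
    · by_cases h2 : age ≤ 12
      · simpa [h1, h2, PySem.Dict.modify, PySem.Dict.getD, PySem.Dict.get?, PySem.Dict.insert,
          PySem.Dict.contains, List.set, List.getD] using ih a (b + 1) c d
      · by_cases h3 : age ≤ 36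
        · simpa [h1, h2, h3, PySem.Dict.modify, PySem.Dict.getD, PySem.Dict.get?, PySem.Dict.insert,
            PySem.Dict.contains, List.set, List.getD] using ih a b (c + 1) d
        · simpa [h1, h2, h3, PySem.Dict.modify, PySem.Dict.getD, PySem.Dict.get?, PySem.Dict.insert,
            PySem.Dict.contains, List.set, List.getD] using ih a b c (d + 1)

-- ===== VERDICT (by name: the statement is the Claim_ definition above) =====
theorem repo_recency_bands_py_spec : Claim_equal_repo_recency_bands_py := by
  intro repos _
  unfold Spec_repo_recency_bands_py repo_recency_bands_py repo_recency_bands_py_alt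
  have e : PySem.Dict.ofList [("fresh", (0 : Int)), ("recent", 0), ("established", 0), ("legacy", 0)]
      = PySem.Dict.mk [("fresh", 0), ("recent", 0), ("established", 0), ("legacy", 0)] := rfl
  rw [e]
  exact pv_fold_eq repos 0 0 0 0
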